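-- pv_equiv track=rewrite | github.com/RafaelPereira014/LECI | IA/guiao1/ex2.py | remove_e_conta
-- ===== SOURCE A (Python) =====
-- def remove_e_conta(list,elem):
--     if (list == []):
--         return [],0
--     else:
--         (tmp,count) = remove_e_conta(list[1:],elem)
--
--         if list[0] == elem:
--             return tmp,count+1
--         else:
--             return [list[0]]+tmp,count
-- ===== SOURCE B (Python) =====
-- def remove_e_conta(list, elem):
--     kept = []
--     count = 0
--     for x in list:
--         if x == elem:
--             count += 1
--         else:
--             kept.append(x)
--     return kept, count
-- ===== Notes on version B (the rewrite author's own statement) =====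
-- stated objective: faster
-- what changed: Replaced the quadratic recursion (slicing list[1:] and list-concatenating [head]+tmp at every level) with a single iterative pass that appends kept elements and increments a counter.
import Mathlib
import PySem

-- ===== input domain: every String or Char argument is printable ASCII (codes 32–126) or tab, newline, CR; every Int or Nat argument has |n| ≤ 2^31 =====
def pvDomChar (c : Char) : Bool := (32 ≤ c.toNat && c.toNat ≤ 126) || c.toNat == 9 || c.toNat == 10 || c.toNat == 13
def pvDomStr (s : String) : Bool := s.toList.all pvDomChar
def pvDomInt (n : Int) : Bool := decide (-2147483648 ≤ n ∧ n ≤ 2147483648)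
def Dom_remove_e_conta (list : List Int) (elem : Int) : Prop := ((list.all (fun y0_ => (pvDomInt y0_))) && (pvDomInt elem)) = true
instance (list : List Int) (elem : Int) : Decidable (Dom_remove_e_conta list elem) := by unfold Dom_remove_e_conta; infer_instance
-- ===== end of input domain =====

-- B replaces A's quadratic recursion (list[1:] slices and [head]+tmp concatenations) with one iterative filtering-and-counting pass: faster.

-- ===== PORT A =====
def remove_e_conta (list : List Int) (elem : Int) : List Int × Int :=
  if list = [] then ([], 0)
  else
    let rest := PySem.List.slice list (some 1) none  -- list[1:]
    let tc := remove_e_conta rest elem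
    match PySem.List.pyGet? list 0 with
    | some h => if h = elem then (tc.1, tc.2 + 1) else ([h] ++ tc.1, tc.2)
    | none => ([], 0)  -- unreachable: list ≠ []
termination_by list.length
decreasing_by
  rw [PySem.List.slice_from_one]
  cases list with
  | nil => simp_all
  | cons a l => simp

-- ===== PORT B =====
def remove_e_conta_alt (list : List Int) (elem : Int) : List Int × Int :=
  list.foldl (fun st x => if x = elem then (st.1, st.2 + 1) else (st.1 ++ [x], st.2)) ([], 0)

-- ===== PRECONDITION & SPEC =====
def Spec_remove_e_conta (list : List Int) (elem : Int) (out : List Int × Int) : Prop := out = remove_e_conta_alt list elem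
instance (list : List Int) (elem : Int) (out : List Int × Int) : Decidable (Spec_remove_e_conta list elem out) := by unfold Spec_remove_e_conta; infer_instance

-- ===== CLAIM (what is proved, stated in full; the proofs are below) =====
def Claim_equal_remove_e_conta : Prop := ∀ (list : List Int) (elem : Int), Dom_remove_e_conta list elem → Spec_remove_e_conta list elem (remove_e_conta list elem)

-- ===== LEMMAS AND PROOFS =====

-- A computes filter-and-count
theorem remove_e_conta_eq_filter_count (list : List Int) (elem : Int) :
    remove_e_conta list elem = (list.filter (fun x => x ≠ elem), (list.count elem : Int)) := by
  induction list with
  | nil => simp [remove_e_conta]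
  | cons a l ih =>
    rw [remove_e_conta]
    rw [PySem.List.slice_from_one]
    simp only [List.tail_cons, PySem.List.pyGet?_zero_cons]
    simp [ih, List.filter_cons, List.count_cons]
    by_cases h : a = elem <;> simp [h]

-- B's foldl invariant
theorem alt_foldl_inv (l : List Int) (elem : Int) (acc : List Int) (c : Int) :
    l.foldl (fun st x => if x = elem then (st.1, st.2 + 1) else (st.1 ++ [x], st.2)) (acc, c)
      = (acc ++ l.filter (fun x => x ≠ elem), c + (l.count elem : Int)) := by
  induction l generalizing acc c with
  | nil => simp
  | cons a l ih =>
    simp only [List.foldl_cons, List.filter_cons, List.count_cons]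
    by_cases h : a = elem <;> simp [h, ih] <;> ring

theorem remove_e_conta_alt_eq (list : List Int) (elem : Int) :
    remove_e_conta_alt list elem = (list.filter (fun x => x ≠ elem), (list.count elem : Int)) := by
  unfold remove_e_conta_alt
  rw [alt_foldl_inv]
  simp

-- ===== VERDICT (by name: the statement is the Claim_ definition above) =====
theorem remove_e_conta_spec : Claim_equal_remove_e_conta := by
  intro list elem _
  unfold Spec_remove_e_conta
  rw [remove_e_conta_eq_filter_count, remove_e_conta_alt_eq]
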